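-- pv_equiv track=rewrite | github.com/conejoo/betweenness_astro | jaro.py | check_author_not_same_fix
-- ===== SOURCE A (Python) =====
-- def check_author_not_same_fix(authors_fix, author1_name, author1_docs, author2_name, author2_docs, reverse=True):
--     if author1_name in authors_fix:
--         for doc1 in author1_docs:
--             if doc1 in authors_fix[author1_name]:
--                 if author2_name in authors_fix[author1_name][doc1]:
--                     for doc2 in author2_docs:
--                         if doc2 in authors_fix[author1_name][doc1][author2_name]:
--                             return True
--     if reverse:
--         return check_author_not_same_fix(authors_fix, author2_name, author2_docs, author1_name, author1_docs, reverse=False)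
--     return False
-- ===== SOURCE B (Python) =====
-- def check_author_not_same_fix(authors_fix, author1_name, author1_docs, author2_name, author2_docs, reverse=True):
--     directions = [(author1_name, frozenset(author1_docs), author2_name, frozenset(author2_docs))]
--     if reverse:
--         directions.append((author2_name, frozenset(author2_docs), author1_name, frozenset(author1_docs)))
--     for a_name, a_set, b_name, b_set in directions:
--         for doc, coauthors in authors_fix.get(a_name, {}).items():
--             if doc in a_set and not b_set.isdisjoint(coauthors.get(b_name, ())):
--                 return True
--     return False
-- ===== Notes on version B (the rewrite author's own statement) =====
-- stated objective: alternative
-- what changed: Inverts the traversal: instead of A's self-recursion-with-flag that loops over the query doc lists doing nested dict lookups and an inner linear scan, B builds a list of one or two direction tuples with both query doc lists hashed into frozensets, then scans the STORED docmap's items once per direction, testing each stored doc against the query set and each stored coauthor list via set.isdisjoint.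
import Mathlib
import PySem

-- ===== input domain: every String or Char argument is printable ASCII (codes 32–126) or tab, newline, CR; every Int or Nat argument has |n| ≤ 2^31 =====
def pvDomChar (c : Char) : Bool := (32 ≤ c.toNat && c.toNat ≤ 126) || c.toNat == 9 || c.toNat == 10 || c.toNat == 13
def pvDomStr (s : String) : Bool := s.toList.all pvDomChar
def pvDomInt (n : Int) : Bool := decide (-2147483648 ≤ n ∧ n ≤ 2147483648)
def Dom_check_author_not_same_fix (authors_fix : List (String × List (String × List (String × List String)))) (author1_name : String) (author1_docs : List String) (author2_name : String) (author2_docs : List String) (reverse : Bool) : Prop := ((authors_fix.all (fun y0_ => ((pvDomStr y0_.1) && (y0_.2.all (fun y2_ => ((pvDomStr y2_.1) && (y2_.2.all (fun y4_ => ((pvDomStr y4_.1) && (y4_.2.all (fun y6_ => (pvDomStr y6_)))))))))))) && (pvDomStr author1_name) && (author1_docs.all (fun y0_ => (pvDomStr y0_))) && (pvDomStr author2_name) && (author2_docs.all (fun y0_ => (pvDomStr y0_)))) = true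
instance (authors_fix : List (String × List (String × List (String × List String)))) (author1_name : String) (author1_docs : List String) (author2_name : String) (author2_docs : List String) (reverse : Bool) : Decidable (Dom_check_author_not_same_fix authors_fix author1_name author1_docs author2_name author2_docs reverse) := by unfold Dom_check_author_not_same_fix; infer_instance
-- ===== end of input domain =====

-- B inverts A's traversal: A recurses with a flag and loops over the query doc lists with
-- nested dict lookups; B scans the stored docmap's items once per direction against hashed
-- query sets (alternative decomposition; same cost).

-- ===== PORT A =====
-- inner `for doc2 in author2_docs: if doc2 in …: return True` loop
def pvA_inner (lst : List String) : List String → Bool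
  | [] => false
  | d2 :: rest => if lst.contains d2 then true else pvA_inner lst rest

-- outer `for doc1 in author1_docs: …` loop (dict lookup = first match in the assoc list)
def pvA_outer (m1 : List (String × List (String × List String))) (a2name : String) (a2docs : List String) : List String → Bool
  | [] => false
  | d1 :: rest =>
    match m1.lookup d1 with
    | none => pvA_outer m1 a2name a2docs rest
    | some m2 =>
      match m2.lookup a2name with
      | none => pvA_outer m1 a2name a2docs rest
      | some lst => if pvA_inner lst a2docs then true else pvA_outer m1 a2name a2docs rest

def check_author_not_same_fix (authors_fix : List (String × List (String × List (String × List String)))) (author1_name : String) (author1_docs : List String) (author2_name : String) (author2_docs : List String) (reverse : Bool) : Bool :=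
  let found :=
    match authors_fix.lookup author1_name with
    | none => false
    | some m1 => pvA_outer m1 author2_name author2_docs author1_docs
  if found then true
  else
    match reverse with
    | true => check_author_not_same_fix authors_fix author2_name author2_docs author1_name author1_docs false
    | false => false
termination_by reverse.toNat
decreasing_by simp

-- ===== PORT B =====
-- Python dict iteration (`.items()`) under the assoc-list-as-dict convention (first
-- occurrence of a key is the binding): keep each key's first pair, skip shadowed ones.
def pvItems {α : Type} (seen : List String) : List (String × α) → List (String × α)
  | [] => []
  | p :: rest => if seen.contains p.1 then pvItems seen rest else p :: pvItems (p.1 :: seen) rest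

-- one direction of B: scan the STORED docmap's items, test each stored doc against the
-- hashed query set, and each stored coauthor list against the other set via isdisjoint
def pvScanDir (authors_fix : List (String × List (String × List (String × List String)))) (a_name : String) (a_set : List String) (b_name : String) (b_set : List String) : Bool :=
  (pvItems [] ((authors_fix.lookup a_name).getD [])).any (fun p =>
    a_set.contains p.1 && !(((p.2.lookup b_name).getD []).all (fun x => !(b_set.contains x))))

def check_author_not_same_fix_alt (authors_fix : List (String × List (String × List (String × List String)))) (author1_name : String) (author1_docs : List String) (author2_name : String) (author2_docs : List String) (reverse : Bool) : Bool :=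
  let dirs : List (String × List String × String × List String) :=
    [(author1_name, PySem.Set.ofList author1_docs, author2_name, PySem.Set.ofList author2_docs)]
  let dirs := if reverse then dirs ++ [(author2_name, PySem.Set.ofList author2_docs, author1_name, PySem.Set.ofList author1_docs)] else dirs
  dirs.any (fun q => pvScanDir authors_fix q.1 q.2.1 q.2.2.1 q.2.2.2)

-- ===== PRECONDITION & SPEC =====
def Spec_check_author_not_same_fix (authors_fix : List (String × List (String × List (String × List String)))) (author1_name : String) (author1_docs : List String) (author2_name : String) (author2_docs : List String) (reverse : Bool) (out : Bool) : Prop := out = check_author_not_same_fix_alt authors_fix author1_name author1_docs author2_name author2_docs reverse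
instance (authors_fix : List (String × List (String × List (String × List String)))) (author1_name : String) (author1_docs : List String) (author2_name : String) (author2_docs : List String) (reverse : Bool) (out : Bool) : Decidable (Spec_check_author_not_same_fix authors_fix author1_name author1_docs author2_name author2_docs reverse out) := by unfold Spec_check_author_not_same_fix; infer_instance

-- ===== CLAIM (what is proved, stated in full; the proofs are below) =====
def Claim_equal_check_author_not_same_fix : Prop := ∀ (authors_fix : List (String × List (String × List (String × List String)))) (author1_name : String) (author1_docs : List String) (author2_name : String) (author2_docs : List String) (reverse : Bool), Dom_check_author_not_same_fix authors_fix author1_name author1_docs author2_name author2_docs reverse → Spec_check_author_not_same_fix authors_fix author1_name author1_docs author2_name author2_docs reverse (check_author_not_same_fix authors_fix author1_name author1_docs author2_name author2_docs reverse)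

-- ===== LEMMAS AND PROOFS =====
theorem pvA_inner_iff (lst docs : List String) :
    pvA_inner lst docs = true ↔ ∃ d ∈ docs, d ∈ lst := by
  induction docs with
  | nil => simp [pvA_inner]
  | cons d rest ih =>
    unfold pvA_inner
    by_cases h : d ∈ lst
    · simp [h]
    · simp [h, ih, List.contains_iff_mem]

theorem pvA_outer_iff (m1 : List (String × List (String × List String))) (a2 : String) (d2s d1s : List String) :
    pvA_outer m1 a2 d2s d1s = true ↔
      ∃ d1 ∈ d1s, ∃ m2, m1.lookup d1 = some m2 ∧
        ∃ lst, m2.lookup a2 = some lst ∧ ∃ x ∈ d2s, x ∈ lst := by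
  induction d1s with
  | nil => simp [pvA_outer]
  | cons d1 rest ih =>
    unfold pvA_outer
    cases h1 : m1.lookup d1 with
    | none => simp [h1, ih]
    | some m2 =>
      cases h2 : m2.lookup a2 with
      | none => simp [h1, h2, ih]
      | some lst =>
        cases h3 : pvA_inner lst d2s with
        | false =>
          have h3' : ¬ ∃ d ∈ d2s, d ∈ lst := by
            rw [← pvA_inner_iff, h3]; simp
          simp [ih, h1, h2, h3, h3']
        | true =>
          simp [h2, h3]
          exact Or.inl ⟨m2, h1, lst, h2, (pvA_inner_iff lst d2s).mp h3⟩

theorem mem_pvItems {α : Type} (l : List (String × α)) (seen : List String) (pa : String) (pb : α) :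
    (pa, pb) ∈ pvItems seen l ↔ pa ∉ seen ∧ l.lookup pa = some pb := by
  induction l generalizing seen with
  | nil => simp [pvItems]
  | cons q rest ih =>
    obtain ⟨qa, qb⟩ := q
    unfold pvItems
    by_cases hs : qa ∈ seen
    · rw [if_pos (by simpa [List.contains_iff_mem] using hs), ih]
      by_cases hk : pa = qa
      · subst hk; simp [hs, List.lookup]
      · have hb : (pa == qa) = false := by simp [hk]
        simp [List.lookup, hb]
    · rw [if_neg (by simpa [List.contains_iff_mem] using hs)]
      by_cases hk : pa = qa
      · subst hk
        simp [List.mem_cons, ih, hs, List.lookup, Prod.ext_iff, eq_comm]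
      · have hb : (pa == qa) = false := by simp [hk]
        simp [List.mem_cons, ih, hs, List.lookup, hb, Prod.ext_iff, hk]

theorem mem_optGetD {α : Type} (o : Option (List α)) (x : α) :
    x ∈ o.getD [] ↔ ∃ l, o = some l ∧ x ∈ l := by
  cases o <;> simp

-- one direction of A (the body before the recursion) equals one scan of B
theorem pvOneWay_eq (af : List (String × List (String × List (String × List String)))) (a1 : String) (d1s : List String) (a2 : String) (d2s : List String) :
    (match af.lookup a1 with
      | none => false
      | some m1 => pvA_outer m1 a2 d2s d1s) = pvScanDir af a1 (PySem.Set.ofList d1s) a2 (PySem.Set.ofList d2s) := by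
  cases h : af.lookup a1 with
  | none => simp [pvScanDir, h, pvItems]
  | some m1 =>
    simp only [pvScanDir, h, Option.getD_some]
    rw [Bool.eq_iff_iff, pvA_outer_iff, List.any_eq_true]
    constructor
    · rintro ⟨d1, hd1, m2, hm2, lst, hlst, x, hx, hxl⟩
      refine ⟨(d1, m2), ?_, ?_⟩
      · rw [mem_pvItems]; exact ⟨List.not_mem_nil, hm2⟩
      · simp only [Bool.and_eq_true, Bool.not_eq_true', List.all_eq_false]
        refine ⟨by simp [PySem.Set.mem_ofList, hd1], x, ?_, ?_⟩
        · simp [hlst, hxl]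
        · simp [PySem.Set.mem_ofList, hx]
    · rintro ⟨⟨k, co⟩, hp, hcond⟩
      rw [mem_pvItems] at hp
      simp only [Bool.and_eq_true, Bool.not_eq_true', List.all_eq_false] at hcond
      obtain ⟨hmem, x, hx, hxb⟩ := hcond
      rw [mem_optGetD] at hx
      obtain ⟨lst, hlst, hxl⟩ := hx
      refine ⟨k, ?_, co, hp.2, lst, hlst, x, ?_, hxl⟩
      · simpa [PySem.Set.mem_ofList] using hmem
      · simpa [PySem.Set.mem_ofList] using hxb

theorem pvA_false_eq (af : List (String × List (String × List (String × List String)))) (a1 : String) (d1 : List String) (a2 : String) (d2 : List String) :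
    check_author_not_same_fix af a1 d1 a2 d2 false = pvScanDir af a1 (PySem.Set.ofList d1) a2 (PySem.Set.ofList d2) := by
  unfold check_author_not_same_fix
  rw [← pvOneWay_eq]
  cases h : (match af.lookup a1 with
      | none => false
      | some m1 => pvA_outer m1 a2 d2 d1) <;> simp [h]

theorem pvAlt_eq (af : List (String × List (String × List (String × List String)))) (a1 : String) (d1 : List String) (a2 : String) (d2 : List String) (r : Bool) :
    check_author_not_same_fix_alt af a1 d1 a2 d2 r =
      (pvScanDir af a1 (PySem.Set.ofList d1) a2 (PySem.Set.ofList d2)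
        || (r && pvScanDir af a2 (PySem.Set.ofList d2) a1 (PySem.Set.ofList d1))) := by
  cases r <;> simp [check_author_not_same_fix_alt]

theorem check_author_not_same_fix_spec : Claim_equal_check_author_not_same_fix := by
  intro af a1 d1 a2 d2 r _
  unfold Spec_check_author_not_same_fix
  rw [pvAlt_eq]
  cases r with
  | false =>
    rw [Bool.false_and, Bool.or_false]
    exact pvA_false_eq af a1 d1 a2 d2
  | true =>
    conv_lhs => rw [check_author_not_same_fix]
    rw [Bool.true_and, ← pvOneWay_eq af a1 d1 a2 d2, pvA_false_eq af a2 d2 a1 d1]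
    cases h : (match af.lookup a1 with
        | none => false
        | some m1 => pvA_outer m1 a2 d2 d1) <;> simp [h]
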